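-- pv_equiv track=rewrite | github.com/felixschmitz/adventofcode | src/aoc2022/day24/solution.py | find_spots
-- ===== SOURCE A (Python) =====
-- import math
--
-- def find_spots(grid: list[list], start: tuple, finish: tuple) -> list[set]:
--     period = math.lcm(len(grid[0]), len(grid))
--     winds = []
--     directions = {'>': (1, 0), '<': (-1, 0), '^': (0, -1), 'v': (0, 1)}
--     all_cells = {(x, y) for x in range(len(grid[0])) for y in range(len(grid))} | {start, finish}
--     safe_cells = []
--     for y, row in enumerate(grid):
--         for x, cell in enumerate(row):
--             if cell in '<>^v':
--                 winds.append([(x, y), directions[cell]])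
--
--     for _ in range(period):
--         wind_cells = {pos for pos, _ in winds}
--         safe_cells.append(all_cells - wind_cells)
--         for wind in winds:
--             x, y = wind[0]
--             dx, dy = wind[1]
--             wind[0] = ((x + dx) % len(grid[0]), (y + dy) % len(grid))
--
--     return safe_cells
-- ===== SOURCE B (Python) =====
-- import math
--
-- def find_spots(grid: list[list], start: tuple, finish: tuple) -> list[set]:
--     H = len(grid)
--     W = len(grid[0])
--     period = math.lcm(W, H)
--     all_cells = {(x, y) for x in range(W) for y in range(H)} | {start, finish}
--     occupied = [set() for _ in range(period)]
--     for y, row in enumerate(grid):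
--         for x, cell in enumerate(row):
--             if cell == '>':
--                 dx, dy = 1, 0
--             elif cell == '<':
--                 dx, dy = -1, 0
--             elif cell == '^':
--                 dx, dy = 0, -1
--             elif cell == 'v':
--                 dx, dy = 0, 1
--             else:
--                 continue
--             occupied = [occ | {((x + dx * t) % W, (y + dy * t) % H)}
--                         for t, occ in enumerate(occupied)]
--     return [all_cells - occ for occ in occupied]
-- ===== Notes on version B (the rewrite author's own statement) =====
-- stated objective: alternative
-- what changed: B is wind-major instead of time-major: no per-step wind state is carried; for each wind it stamps that wind's closed-form position ((x+dx*t) % W, (y+dy*t) % H) into a pre-allocated per-timestep occupancy table, then subtracts each table entry from all_cells.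
-- outside the precondition, e.g. on find_spots([['>'], ['.', '>']], (0, 0), (0, 0)): A returns [{(0, 1)}, set()], B returns [set(), set()]
import Mathlib
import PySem

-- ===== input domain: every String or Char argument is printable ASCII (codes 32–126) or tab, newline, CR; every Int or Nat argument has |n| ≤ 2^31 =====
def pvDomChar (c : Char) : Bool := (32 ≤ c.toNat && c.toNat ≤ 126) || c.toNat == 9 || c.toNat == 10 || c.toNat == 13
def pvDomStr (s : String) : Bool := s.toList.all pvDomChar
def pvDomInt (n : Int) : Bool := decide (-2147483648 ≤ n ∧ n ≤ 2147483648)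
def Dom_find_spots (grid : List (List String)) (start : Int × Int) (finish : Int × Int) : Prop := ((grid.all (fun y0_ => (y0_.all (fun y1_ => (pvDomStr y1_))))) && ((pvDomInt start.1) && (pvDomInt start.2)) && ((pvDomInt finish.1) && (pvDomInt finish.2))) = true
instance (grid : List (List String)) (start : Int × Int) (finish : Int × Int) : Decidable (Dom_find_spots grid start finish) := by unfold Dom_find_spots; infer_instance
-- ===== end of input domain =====

-- B is wind-major instead of time-major: it carries no per-step wind state, stamping each wind's
-- closed-form position for every timestep into a pre-allocated occupancy table; alternative
-- decomposition, same cost.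

-- ===== PORT A =====
def find_spots (grid : List (List String)) (start : Int × Int) (finish : Int × Int) : List (List (Int × Int)) :=
  let W : Nat := (grid.headD []).length        -- len(grid[0]); grid = [] raises IndexError, excluded by Pre_
  let H : Nat := grid.length
  let period : Nat := Nat.lcm W H
  let directions : PySem.Dict String (Int × Int) :=
    PySem.Dict.ofList [(">", (1, 0)), ("<", (-1, 0)), ("^", (0, -1)), ("v", (0, 1))]
  let all_cells : PySem.Set (Int × Int) :=
    PySem.Set.union
      (PySem.Set.ofList ((PySem.List.pyRange 0 (W : Int) 1).flatMap
        (fun x => (PySem.List.pyRange 0 (H : Int) 1).map (fun y => (x, y)))))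
      [start, finish]
  let winds : List ((Int × Int) × (Int × Int)) :=
    (PySem.List.enumerate grid 0).foldl (fun ws yr =>
      (PySem.List.enumerate yr.2 0).foldl (fun ws' xc =>
        if PySem.Str.isIn xc.2 "<>^v" then
          match directions.get? xc.2 with
          | some d => ws' ++ [((xc.1, yr.1), d)]
          | none => ws'          -- Python raises KeyError here (cell a substring of '<>^v' but no key); excluded by Pre_
        else ws') ws) []
  ((PySem.List.pyRange 0 (period : Int) 1).foldl (fun st _ =>
      let wind_cells : PySem.Set (Int × Int) := PySem.Set.ofList (st.1.map (fun w => w.1))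
      (st.1.map (fun w =>
          ((PySem.Int.mod (w.1.1 + w.2.1) (W : Int), PySem.Int.mod (w.1.2 + w.2.2) (H : Int)), w.2)),
       st.2 ++ [PySem.Set.diff all_cells wind_cells]))
    (winds, ([] : List (List (Int × Int))))).2

-- ===== PORT B =====
-- the if/elif chain of Source B, as a helper: direction of a wind cell, none for any other cell
def pvDir (c : String) : Option (Int × Int) :=
  if c == ">" then some (1, 0)
  else if c == "<" then some (-1, 0)
  else if c == "^" then some (0, -1)
  else if c == "v" then some (0, 1)
  else none

def find_spots_alt (grid : List (List String)) (start : Int × Int) (finish : Int × Int) : List (List (Int × Int)) :=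
  let H : Nat := grid.length
  let W : Nat := (grid.headD []).length        -- len(grid[0]); grid = [] raises IndexError, excluded by Pre_
  let period : Nat := Nat.lcm W H
  let all_cells : PySem.Set (Int × Int) :=
    PySem.Set.union
      (PySem.Set.ofList ((PySem.List.pyRange 0 (W : Int) 1).flatMap
        (fun x => (PySem.List.pyRange 0 (H : Int) 1).map (fun y => (x, y)))))
      [start, finish]
  let occupied : List (PySem.Set (Int × Int)) :=
    (PySem.List.enumerate grid 0).foldl (fun occ yr =>
      (PySem.List.enumerate yr.2 0).foldl (fun occ' xc =>
        match pvDir xc.2 with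
        | none => occ'                         -- 'continue'
        | some (dx, dy) =>
          (PySem.List.enumerate occ' 0).map (fun tp =>
            PySem.Set.add tp.2
              (PySem.Int.mod (xc.1 + dx * tp.1) (W : Int),
               PySem.Int.mod (yr.1 + dy * tp.1) (H : Int)))) occ)
      (List.replicate period PySem.Set.empty)
  occupied.map (fun occ => PySem.Set.diff all_cells occ)

-- ===== PRECONDITION & SPEC =====
def pvIsWind (c : String) : Bool := PySem.Str.isIn c "<>^v"

-- Pre_ excludes: (a) grid = [] (A raises IndexError); (b) any cell that is a substring of '<>^v' other
-- than the four single direction characters, e.g. '' or '>^' (A raises KeyError); (c) ragged grids with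
-- a wind character at a column ≥ len(grid[0]) > 0 — there A's first timestep removes the raw, unwrapped
-- initial wind position while B wraps it immediately, and on a non-rectangular grid both choices are
-- equally accidental (on some such grids the two results still coincide).
def Pre_find_spots (grid : List (List String)) (start : Int × Int) (finish : Int × Int) : Prop :=
  grid ≠ [] ∧
  (grid.all (fun row => row.all (fun c =>
    !pvIsWind c || (c == ">" || c == "<" || c == "^" || c == "v")))) = true ∧
  ((grid.headD []).length = 0 ∨
    (grid.all (fun row => (row.drop (grid.headD []).length).all (fun c => !pvIsWind c))) = true)
instance (grid : List (List String)) (start : Int × Int) (finish : Int × Int) : Decidable (Pre_find_spots grid start finish) := by unfold Pre_find_spots; infer_instance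

def pvWitness_find_spots : List (List String) × (Int × Int) × (Int × Int) :=
  ([[">", "."], [".", "v"]], (0, -1), (1, 2))

def Spec_find_spots (grid : List (List String)) (start : Int × Int) (finish : Int × Int) (out : List (List (Int × Int))) : Prop := out = find_spots_alt grid start finish
instance (grid : List (List String)) (start : Int × Int) (finish : Int × Int) (out : List (List (Int × Int))) : Decidable (Spec_find_spots grid start finish out) := by unfold Spec_find_spots; infer_instance

-- ===== CLAIM (what is proved, stated in full; the proofs are below) =====
def Claim_equal_find_spots : Prop := ∀ (grid : List (List String)) (start : Int × Int) (finish : Int × Int), Dom_find_spots grid start finish → Pre_find_spots grid start finish → Spec_find_spots grid start finish (find_spots grid start finish)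

-- ===== LEMMAS AND PROOFS =====

-- abbreviation used only in the proofs: a wind's cell at time t
def pvPos (W H : Nat) (w : (Int × Int) × (Int × Int)) (t : Int) : Int × Int :=
  (PySem.Int.mod (w.1.1 + w.2.1 * t) (W : Int), PySem.Int.mod (w.1.2 + w.2.2 * t) (H : Int))

-- one wind's position after one more step, given its position after t steps (W, H > 0)
theorem pv_mod_step (x d t W : Int) (hW : 0 < W) :
    PySem.Int.mod (PySem.Int.mod (x + d * t) W + d) W = PySem.Int.mod (x + d * (t + 1)) W := by
  rw [PySem.Int.mod_eq_emod_of_pos hW, PySem.Int.mod_eq_emod_of_pos hW,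
      PySem.Int.mod_eq_emod_of_pos hW, Int.emod_add_emod]
  ring_nf

theorem winds_fold_eq (dirs : PySem.Dict String (Int × Int)) (grid : List (List String)) :
    (PySem.List.enumerate grid 0).foldl (fun ws yr =>
      (PySem.List.enumerate yr.2 0).foldl (fun ws' xc =>
        if PySem.Str.isIn xc.2 "<>^v" then
          match dirs.get? xc.2 with
          | some d => ws' ++ [((xc.1, yr.1), d)]
          | none => ws'
        else ws') ws) ([] : List ((Int × Int) × (Int × Int)))
    = (PySem.List.enumerate grid 0).flatMap (fun yr =>
        (PySem.List.enumerate yr.2 0).flatMap (fun xc =>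
          if PySem.Str.isIn xc.2 "<>^v" then
            match dirs.get? xc.2 with
            | some d => [((xc.1, yr.1), d)]
            | none => []
          else [])) := by
  have inner : ∀ (yr : Int × List String) (ws : List ((Int × Int) × (Int × Int))),
      (PySem.List.enumerate yr.2 0).foldl (fun ws' xc =>
        if PySem.Str.isIn xc.2 "<>^v" then
          match dirs.get? xc.2 with
          | some d => ws' ++ [((xc.1, yr.1), d)]
          | none => ws'
        else ws') ws
      = ws ++ (PySem.List.enumerate yr.2 0).flatMap (fun xc =>
          if PySem.Str.isIn xc.2 "<>^v" then
            match dirs.get? xc.2 with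
            | some d => [((xc.1, yr.1), d)]
            | none => []
          else []) := by
    intro yr ws
    have h1 := PySem.List.foldl_congr_mem
      (l := PySem.List.enumerate yr.2 0) (init := ws)
      (f := fun ws' xc =>
        if PySem.Str.isIn xc.2 "<>^v" then
          match dirs.get? xc.2 with
          | some d => ws' ++ [((xc.1, yr.1), d)]
          | none => ws'
        else ws')
      (g := fun ws' xc => ws' ++ (if PySem.Str.isIn xc.2 "<>^v" then
          match dirs.get? xc.2 with
          | some d => [((xc.1, yr.1), d)]
          | none => []
        else []))
      (by
        intro a xc _
        simp only []
        split_ifs with h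
        · cases dirs.get? xc.2 <;> simp
        · simp)
    rw [h1, PySem.List.foldl_append_eq_flatMap]
  have h2 := PySem.List.foldl_congr_mem
    (l := PySem.List.enumerate grid 0) (init := ([] : List ((Int × Int) × (Int × Int))))
    (f := fun ws yr =>
      (PySem.List.enumerate yr.2 0).foldl (fun ws' xc =>
        if PySem.Str.isIn xc.2 "<>^v" then
          match dirs.get? xc.2 with
          | some d => ws' ++ [((xc.1, yr.1), d)]
          | none => ws'
        else ws') ws)
    (g := fun ws yr => ws ++ (PySem.List.enumerate yr.2 0).flatMap (fun xc =>
        if PySem.Str.isIn xc.2 "<>^v" then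
          match dirs.get? xc.2 with
          | some d => [((xc.1, yr.1), d)]
          | none => []
        else []))
    (by intro a yr _; exact inner yr a)
  rw [h2, PySem.List.foldl_append_eq_flatMap]
  simp

theorem winds_mem_alt (grid : List (List String))
    (w : (Int × Int) × (Int × Int))
    (hw : w ∈ (PySem.List.enumerate grid 0).flatMap (fun yr =>
        (PySem.List.enumerate yr.2 0).flatMap (fun xc =>
          match pvDir xc.2 with
          | none => []
          | some d => [((xc.1, yr.1), d)]))) :
    ∃ (i k : Nat), ∃ (hk : k < grid.length), ∃ (hi : i < grid[k].length),
      w.1 = ((i : Int), (k : Int)) ∧ PySem.Str.isIn grid[k][i] "<>^v" = true := by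
  rw [List.mem_flatMap] at hw
  obtain ⟨yr, hyr, hw⟩ := hw
  rw [PySem.List.mem_enumerate_iff] at hyr
  obtain ⟨k, hk, rfl⟩ := hyr
  rw [List.mem_flatMap] at hw
  obtain ⟨xc, hxc, hw⟩ := hw
  rw [PySem.List.mem_enumerate_iff] at hxc
  obtain ⟨i, hi, rfl⟩ := hxc
  refine ⟨i, k, hk, hi, ?_⟩
  simp only [] at hw
  cases hdd : pvDir grid[k][i] with
  | none => rw [hdd] at hw; simp at hw
  | some d =>
    rw [hdd] at hw
    simp only [List.mem_singleton] at hw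
    subst hw
    refine ⟨by simp, ?_⟩
    have hfour : grid[k][i] = ">" ∨ grid[k][i] = "<" ∨ grid[k][i] = "^" ∨ grid[k][i] = "v" := by
      unfold pvDir at hdd
      split_ifs at hdd with h1 h2 h3 h4
      · exact Or.inl (by simpa using h1)
      · exact Or.inr (Or.inl (by simpa using h2))
      · exact Or.inr (Or.inr (Or.inl (by simpa using h3)))
      · exact Or.inr (Or.inr (Or.inr (by simpa using h4)))
    rcases hfour with h | h | h | h <;> rw [h] <;> try decide

theorem loop_eq (W H : Nat) (hW : 0 < W) (hH : 0 < H) (ac : PySem.Set (Int × Int))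
    (ws0 : List ((Int × Int) × (Int × Int)))
    (hb : ∀ w ∈ ws0, ∃ i k : Nat, w.1 = ((i : Int), (k : Int)) ∧ i < W ∧ k < H)
    (n : Nat) (acc : List (List (Int × Int))) :
    (PySem.List.pyRange 0 (n : Int) 1).foldl (fun st (_ : Int) =>
        (st.1.map (fun w =>
            ((PySem.Int.mod (w.1.1 + w.2.1) (W : Int), PySem.Int.mod (w.1.2 + w.2.2) (H : Int)), w.2)),
         st.2 ++ [PySem.Set.diff ac (PySem.Set.ofList (st.1.map (fun w => w.1)))]))
      (ws0, acc)
    = (ws0.map (fun w =>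
          ((PySem.Int.mod (w.1.1 + w.2.1 * (n : Int)) (W : Int), PySem.Int.mod (w.1.2 + w.2.2 * (n : Int)) (H : Int)), w.2)),
       acc ++ (PySem.List.pyRange 0 (n : Int) 1).map (fun t =>
         PySem.Set.diff ac (PySem.Set.ofList (ws0.map (fun w =>
           (PySem.Int.mod (w.1.1 + w.2.1 * t) (W : Int), PySem.Int.mod (w.1.2 + w.2.2 * t) (H : Int))))))) := by
  induction n with
  | zero =>
    rw [PySem.List.pyRange_one_eq_nil (by norm_num)]
    simp only [List.foldl_nil, List.map_nil, List.append_nil]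
    have : ws0.map (fun w =>
        ((PySem.Int.mod (w.1.1 + w.2.1 * ((0 : Nat) : Int)) (W : Int), PySem.Int.mod (w.1.2 + w.2.2 * ((0 : Nat) : Int)) (H : Int)), w.2)) = ws0 := by
      rw [List.map_congr_left (g := id) ?h, List.map_id]
      intro w hw
      obtain ⟨i, k, h1, hi, hk⟩ := hb w hw
      obtain ⟨⟨x, y⟩, d⟩ := w
      simp only [Prod.mk.injEq] at h1
      obtain ⟨rfl, rfl⟩ := h1
      simp [Nat.mod_eq_of_lt hi, Nat.mod_eq_of_lt hk]
    rw [this]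
  | succ m ih =>
    have hcast : (((m + 1 : Nat)) : Int) = (m : Int) + 1 := by push_cast; ring
    rw [hcast, PySem.List.pyRange_one_succ_right (by positivity), List.foldl_append, ih]
    simp only [List.foldl_cons, List.foldl_nil, List.map_append, List.map_cons, List.map_nil,
      List.append_assoc]
    rw [Prod.mk.injEq]
    refine ⟨?_, ?_⟩
    · rw [List.map_map]
      refine List.map_congr_left ?_
      intro w _
      simp only [Function.comp]
      rw [pv_mod_step _ _ _ _ (by exact_mod_cast hW), pv_mod_step _ _ _ _ (by exact_mod_cast hH)]
    · rw [List.map_map]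
      rfl

theorem foldl_add_eq_ofList_map {α β : Type} [BEq α] (g : β → α) (l : List β) :
    l.foldl (fun s w => PySem.Set.add s (g w)) PySem.Set.empty = PySem.Set.ofList (l.map g) := by
  rw [PySem.Set.ofList_eq_foldl, List.foldl_map]
  rfl

-- generic: folding over a flatMap = nested folding
theorem foldl_flatMap_eq {α β γ : Type} (l : List α) (g : α → List β) (f : γ → β → γ) (init : γ) :
    (l.flatMap g).foldl f init = l.foldl (fun a x => (g x).foldl f a) init := by
  induction l generalizing init with
  | nil => rfl
  | cons h t ih => simp [List.flatMap_cons, List.foldl_append, ih]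

-- B's per-wind table update
def pvStep (W H : Nat) (occ : List (PySem.Set (Int × Int))) (w : (Int × Int) × (Int × Int)) :
    List (PySem.Set (Int × Int)) :=
  (PySem.List.enumerate occ 0).map (fun tp => PySem.Set.add tp.2 (pvPos W H w tp.1))

theorem length_pvStep_fold (W H : Nat) (ws : List ((Int × Int) × (Int × Int)))
    (occ : List (PySem.Set (Int × Int))) :
    (ws.foldl (pvStep W H) occ).length = occ.length := by
  induction ws generalizing occ with
  | nil => rfl
  | cons w t ih => simp [ih, pvStep, PySem.List.length_enumerate]

theorem getElem_pvStep_fold (W H : Nat) (ws : List ((Int × Int) × (Int × Int)))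
    (occ : List (PySem.Set (Int × Int))) (i : Nat) (hi : i < occ.length)
    (hi' : i < (ws.foldl (pvStep W H) occ).length) :
    (ws.foldl (pvStep W H) occ)[i] =
      ws.foldl (fun s w => PySem.Set.add s (pvPos W H w (i : Int))) occ[i] := by
  induction ws generalizing occ with
  | nil => simp
  | cons w t ih =>
    simp only [List.foldl_cons]
    have hlen : (pvStep W H occ w).length = occ.length := by
      simp [pvStep, PySem.List.length_enumerate]
    have hi2 : i < (pvStep W H occ w).length := by omega
    rw [ih (pvStep W H occ w) hi2 (by rw [length_pvStep_fold, hlen]; exact hi)]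
    have hstep : (pvStep W H occ w)[i] = PySem.Set.add occ[i] (pvPos W H w (i : Int)) := by
      unfold pvStep
      rw [List.getElem_map, PySem.List.getElem_enumerate]
      simp
    rw [hstep]

-- B's nested grid fold equals folding pvStep over the flatMap winds list
theorem b_fold_eq (W H : Nat) (grid : List (List String)) (occ0 : List (PySem.Set (Int × Int))) :
    (PySem.List.enumerate grid 0).foldl (fun occ yr =>
      (PySem.List.enumerate yr.2 0).foldl (fun occ' xc =>
        match pvDir xc.2 with
        | none => occ'
        | some (dx, dy) =>
          (PySem.List.enumerate occ' 0).map (fun tp =>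
            PySem.Set.add tp.2
              (PySem.Int.mod (xc.1 + dx * tp.1) (W : Int),
               PySem.Int.mod (yr.1 + dy * tp.1) (H : Int)))) occ) occ0
    = ((PySem.List.enumerate grid 0).flatMap (fun yr =>
        (PySem.List.enumerate yr.2 0).flatMap (fun xc =>
          match pvDir xc.2 with
          | none => []
          | some d => [((xc.1, yr.1), d)]))).foldl (pvStep W H) occ0 := by
  rw [foldl_flatMap_eq]
  have hfun : (fun (occ : List (PySem.Set (Int × Int))) (yr : Int × List String) =>
      (PySem.List.enumerate yr.2 0).foldl (fun occ' xc =>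
        match pvDir xc.2 with
        | none => occ'
        | some (dx, dy) =>
          (PySem.List.enumerate occ' 0).map (fun tp =>
            PySem.Set.add tp.2
              (PySem.Int.mod (xc.1 + dx * tp.1) (W : Int),
               PySem.Int.mod (yr.1 + dy * tp.1) (H : Int)))) occ)
      = (fun occ yr =>
        ((PySem.List.enumerate yr.2 0).flatMap (fun xc =>
          match pvDir xc.2 with
          | none => []
          | some d => [((xc.1, yr.1), d)])).foldl (pvStep W H) occ) := by
    funext occ yr
    rw [foldl_flatMap_eq]
    have hinner : (fun (occ' : List (PySem.Set (Int × Int))) (xc : Int × String) =>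
        match pvDir xc.2 with
        | none => occ'
        | some (dx, dy) =>
          (PySem.List.enumerate occ' 0).map (fun tp =>
            PySem.Set.add tp.2
              (PySem.Int.mod (xc.1 + dx * tp.1) (W : Int),
               PySem.Int.mod (yr.1 + dy * tp.1) (H : Int))))
        = (fun occ' xc =>
          (match pvDir xc.2 with
          | none => ([] : List ((Int × Int) × (Int × Int)))
          | some d => [((xc.1, yr.1), d)]).foldl (pvStep W H) occ') := by
      funext occ' xc
      cases hd : pvDir xc.2 with
      | none => rfl
      | some d =>
        obtain ⟨dx, dy⟩ := d
        simp [pvStep, pvPos]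
    rw [hinner]
  rw [hfun]

-- under Pre_'s key condition, A's winds list (isIn + dict lookup) equals B's (pvDir)
theorem winds_lists_eq (grid : List (List String))
    (hkey : (grid.all (fun row => row.all (fun c =>
      !pvIsWind c || (c == ">" || c == "<" || c == "^" || c == "v")))) = true) :
    (PySem.List.enumerate grid 0).flatMap (fun yr =>
        (PySem.List.enumerate yr.2 0).flatMap (fun xc =>
          if PySem.Str.isIn xc.2 "<>^v" then
            match (PySem.Dict.ofList [(">", ((1 : Int), (0 : Int))), ("<", (-1, 0)), ("^", (0, -1)), ("v", (0, 1))]).get? xc.2 with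
            | some d => [((xc.1, yr.1), d)]
            | none => []
          else []))
    = (PySem.List.enumerate grid 0).flatMap (fun yr =>
        (PySem.List.enumerate yr.2 0).flatMap (fun xc =>
          match pvDir xc.2 with
          | none => []
          | some d => [((xc.1, yr.1), d)])) := by
  refine List.flatMap_congr ?_
  intro yr hyr
  refine List.flatMap_congr ?_
  intro xc hxc
  rw [PySem.List.mem_enumerate_iff] at hyr
  obtain ⟨k, hk, rfl⟩ := hyr
  rw [PySem.List.mem_enumerate_iff] at hxc
  obtain ⟨i, hi, rfl⟩ := hxc
  have hrow := List.all_eq_true.mp hkey _ (List.getElem_mem hk)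
  have hc := List.all_eq_true.mp hrow _ (List.getElem_mem hi)
  set c := grid[k][i] with hcdef
  simp only []
  by_cases h1 : c = ">"
  · rw [h1]
    simp [pvDir, show PySem.Str.isIn ">" "<>^v" = true from by decide,
      show (PySem.Dict.ofList [(">", ((1 : Int), (0 : Int))), ("<", (-1, 0)), ("^", (0, -1)), ("v", (0, 1))]).get? ">" = some (1, 0) from by decide]
    decide
  · by_cases h2 : c = "<"
    · rw [h2]
      simp [pvDir, show PySem.Str.isIn "<" "<>^v" = true from by decide,
        show (PySem.Dict.ofList [(">", ((1 : Int), (0 : Int))), ("<", (-1, 0)), ("^", (0, -1)), ("v", (0, 1))]).get? "<" = some (-1, 0) from by decide]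
      decide
    · by_cases h3 : c = "^"
      · rw [h3]
        simp [pvDir, show PySem.Str.isIn "^" "<>^v" = true from by decide,
          show (PySem.Dict.ofList [(">", ((1 : Int), (0 : Int))), ("<", (-1, 0)), ("^", (0, -1)), ("v", (0, 1))]).get? "^" = some (0, -1) from by decide]
        decide
      · by_cases h4 : c = "v"
        · rw [h4]
          simp [pvDir, show PySem.Str.isIn "v" "<>^v" = true from by decide,
            show (PySem.Dict.ofList [(">", ((1 : Int), (0 : Int))), ("<", (-1, 0)), ("^", (0, -1)), ("v", (0, 1))]).get? "v" = some (0, 1) from by decide]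
          decide
        · have : pvDir c = none := by
            simp [pvDir, h1, h2, h3, h4]
          rw [this]
          have hni : PySem.Str.isIn c "<>^v" = false := by
            rcases Bool.or_eq_true_iff.mp hc with h | h
            · unfold pvIsWind at h; simpa using h
            · exfalso
              rcases Bool.or_eq_true_iff.mp h with h | h
              · rcases Bool.or_eq_true_iff.mp h with h | h
                · rcases Bool.or_eq_true_iff.mp h with h | h
                  · exact h1 (by simpa using h)
                  · exact h2 (by simpa using h)
                · exact h3 (by simpa using h)
              · exact h4 (by simpa using h)
          rw [hni]
          rfl

-- ===== VERDICT (by name: the statement is the Claim_ definition above) =====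
theorem find_spots_spec : Claim_equal_find_spots := by
  intro grid s f _ hPre
  obtain ⟨hne, hkey, hrag⟩ := hPre
  show find_spots grid s f = find_spots_alt grid s f
  simp only [find_spots, find_spots_alt]
  rw [winds_fold_eq, b_fold_eq, winds_lists_eq grid hkey]
  by_cases hW0 : (grid.headD []).length = 0
  · rw [hW0, Nat.lcm_zero_left, Nat.cast_zero, PySem.List.pyRange_one_eq_nil (le_refl (0 : Int))]
    simp only [List.foldl_nil, List.replicate_zero]
    have h0 : ∀ ws : List ((Int × Int) × (Int × Int)),
        ws.foldl (pvStep 0 grid.length) ([] : List (PySem.Set (Int × Int))) = [] :=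
      fun ws => List.eq_nil_of_length_eq_zero (by rw [length_pvStep_fold]; rfl)
    rw [h0]
    rfl
  · have hWpos : 0 < (grid.headD []).length := Nat.pos_of_ne_zero hW0
    have hH : 0 < grid.length := List.length_pos_iff.mpr hne
    have hragged := hrag.resolve_left hW0
    set winds := (PySem.List.enumerate grid 0).flatMap (fun yr =>
        (PySem.List.enumerate yr.2 0).flatMap (fun xc =>
          match pvDir xc.2 with
          | none => []
          | some d => [((xc.1, yr.1), d)])) with hwinds
    have hb : ∀ w ∈ winds, ∃ i k : Nat, w.1 = ((i : Int), (k : Int)) ∧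
        i < (grid.headD []).length ∧ k < grid.length := by
      intro w hw
      obtain ⟨i, k, hk, hi, h1, hwind⟩ := winds_mem_alt grid w hw
      by_cases hiW : i < (grid.headD []).length
      · exact ⟨i, k, h1, hiW, hk⟩
      · exfalso
        have hWle : (grid.headD []).length ≤ i := Nat.le_of_not_lt hiW
        have hrow := List.all_eq_true.mp hragged _ (List.getElem_mem hk)
        have hlt : i - (grid.headD []).length < (grid[k].drop (grid.headD []).length).length := by
          simp only [List.length_drop]; omega
        have hc := List.all_eq_true.mp hrow _ (List.getElem_mem hlt)
        rw [List.getElem_drop] at hc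
        have hidx : (grid.headD []).length + (i - (grid.headD []).length) = i := by omega
        simp only [hidx] at hc
        unfold pvIsWind at hc
        rw [Bool.not_eq_true', hwind] at hc
        exact Bool.false_ne_true hc.symm
    rw [loop_eq (grid.headD []).length grid.length hWpos hH _ _ hb
        (Nat.lcm (grid.headD []).length grid.length) []]
    simp only [List.nil_append]
    refine List.ext_getElem ?_ ?_
    · rw [List.length_map, PySem.List.length_pyRange_one, List.length_map,
        length_pvStep_fold, List.length_replicate]
      omega
    · intro i h1 h2
      rw [List.getElem_map, PySem.List.getElem_pyRange_one, List.getElem_map]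
      have hlenr : i < (List.replicate (Nat.lcm (grid.headD []).length grid.length)
          (PySem.Set.empty (α := Int × Int))).length := by
        rw [List.length_replicate]
        rw [List.length_map, length_pvStep_fold, List.length_replicate] at h2
        exact h2
      rw [getElem_pvStep_fold _ _ _ _ _ hlenr (by rwa [List.length_map] at h2)]
      rw [List.getElem_replicate, foldl_add_eq_ofList_map]
      congr 1
      simp [pvPos]
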